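-- pv_equiv track=rewrite | github.com/JuanPabloCB/minka_app | app/analysts/legal_analyst/legal_task_planner.py | _order_steps
-- ===== SOURCE A (Python) =====
-- from typing import Iterable, List, Set
--
-- def _order_steps(requested_steps: Set[str]) -> List[str]:
--     canonical_order = [
--         "parse",
--         "segment",
--         "classify",
--         "detect_risk",
--         "detect_missing",
--         "explain",
--         "highlight",
--         "report",
--     ]
--     return [step for step in canonical_order if step in requested_steps]
-- ===== SOURCE B (Python) =====
-- def _order_steps(requested_steps):
--     canonical_order = [
--         "parse",
--         "segment",
--         "classify",
--         "detect_risk",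
--         "detect_missing",
--         "explain",
--         "highlight",
--         "report",
--     ]
--     pos = {name: i for i, name in enumerate(canonical_order)}
--     return sorted({s for s in requested_steps if s in pos}, key=pos.get)
-- ===== Notes on version B (the rewrite author's own statement) =====
-- stated objective: alternative
-- what changed: Instead of scanning the fixed canonical list and filtering by membership in the input, B builds a name->index position table once, filters the input down to known steps (as a set), and sorts them by their canonical position.
import Mathlib
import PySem

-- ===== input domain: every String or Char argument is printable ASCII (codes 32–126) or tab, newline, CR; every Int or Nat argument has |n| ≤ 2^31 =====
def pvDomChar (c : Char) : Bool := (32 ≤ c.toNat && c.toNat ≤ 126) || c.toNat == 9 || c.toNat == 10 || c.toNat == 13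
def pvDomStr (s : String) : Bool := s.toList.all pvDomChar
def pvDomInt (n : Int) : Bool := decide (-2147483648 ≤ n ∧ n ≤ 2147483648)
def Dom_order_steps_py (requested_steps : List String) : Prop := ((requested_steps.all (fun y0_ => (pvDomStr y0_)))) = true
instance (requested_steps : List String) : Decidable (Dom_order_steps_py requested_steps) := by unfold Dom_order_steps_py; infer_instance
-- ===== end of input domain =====

-- B replaces A's scan-the-canonical-list-and-filter with a position table: filter the input to known steps and sort them by canonical position (alternative decomposition, similar cost).

-- ===== PORT A =====
def order_steps_py (requested_steps : List String) : List String :=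
  let canonical_order : List String :=
    ["parse", "segment", "classify", "detect_risk", "detect_missing",
     "explain", "highlight", "report"]
  canonical_order.filter (fun step => requested_steps.contains step)

-- ===== PORT B =====
def pvCanonicalB : List String :=
  ["parse", "segment", "classify", "detect_risk", "detect_missing",
   "explain", "highlight", "report"]

-- pos = {name: i for i, name in enumerate(canonical_order)}
def pvPosB : PySem.Dict String Int :=
  (PySem.List.enumerate pvCanonicalB 0).foldl (fun d p => d.insert p.2 p.1) PySem.Dict.empty

-- sorted({s for s in requested_steps if s in pos}, key=pos.get)
-- key=pos.get ported as getD with default 0: exact, since every element kept by the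
-- filter is a key of pos, so pos.get never returns None on the sorted list's elements.
def order_steps_py_alt (requested_steps : List String) : List String :=
  PySem.List.sorted
    (PySem.Set.ofList (requested_steps.filter (fun s => pvPosB.contains s)))
    (fun s => pvPosB.getD s 0) false

-- ===== PRECONDITION & SPEC =====
def Spec_order_steps_py (requested_steps : List String) (out : List String) : Prop := out = order_steps_py_alt requested_steps
instance (requested_steps : List String) (out : List String) : Decidable (Spec_order_steps_py requested_steps out) := by unfold Spec_order_steps_py; infer_instance

-- ===== CLAIM (what is proved, stated in full; the proofs are below) =====
def Claim_equal_order_steps_py : Prop := ∀ (requested_steps : List String), Dom_order_steps_py requested_steps → Spec_order_steps_py requested_steps (order_steps_py requested_steps)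

-- ===== LEMMAS AND PROOFS =====

-- the position table evaluates to a literal dict
theorem pvPosB_eq : pvPosB = PySem.Dict.mk [("parse",0),("segment",1),("classify",2),("detect_risk",3),("detect_missing",4),("explain",5),("highlight",6),("report",7)] := by decide

-- membership in the position table is membership in the canonical list
theorem pvPosB_contains (s : String) : pvPosB.contains s = pvCanonicalB.contains s := by
  rw [pvPosB_eq]
  simp [pvCanonicalB, List.contains_eq_mem]
  rw [Bool.eq_iff_iff]
  simp only [Bool.or_eq_true, beq_iff_eq, decide_eq_true_eq]
  constructor <;> (rintro (h|h|h|h|h|h|h|h) <;> simp [h])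

-- the canonical list is strictly increasing under the position key
theorem pvKeyB_pairwise :
    pvCanonicalB.Pairwise (fun a b => pvPosB.getD a 0 < pvPosB.getD b 0) := by decide

theorem order_steps_main (rs : List String) :
    order_steps_py rs = order_steps_py_alt rs := by
  show pvCanonicalB.filter (fun step => rs.contains step) = _
  unfold order_steps_py_alt
  refine (PySem.List.sorted_eq_of_perm_of_pairwise_lt _ _ _ ?_ ?_).symm
  · rw [List.perm_ext_iff_of_nodup
      (List.Nodup.filter _ (by decide : pvCanonicalB.Nodup))
      (PySem.Set.nodup_ofList _)]
    intro a
    simp [PySem.Set.mem_ofList, pvPosB_contains, List.contains_eq_mem, and_comm]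
  · exact List.Pairwise.sublist List.filter_sublist pvKeyB_pairwise

-- ===== VERDICT (by name: the statement is the Claim_ definition above) =====
theorem order_steps_py_spec : Claim_equal_order_steps_py := by
  intro rs _
  unfold Spec_order_steps_py
  exact order_steps_main rs
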